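-- pv_equiv track=rewrite | github.com/kiraskywing/Code_Practice | CodeSignal/compare-string-delete-one-digit.py | solution
-- ===== SOURCE A (Python) =====
-- def solution(s, t):
--     m, n = len(s), len(t)
--     s_digits = [i for i in range(m) if s[i].isdigit()]
--     t_digits = [i for i in range(n) if t[i].isdigit()]
--
--     res = 0
--     for i in s_digits:
--         s2 = s[:i] + s[i+1:]
--         res += s2 < t
--
--     for j in t_digits:
--         t2 = t[:j] + t[j+1:]
--         res += s < t2
--
--     return res
-- ===== SOURCE B (Python) =====
-- def solution(s, t):
--     # Compare x-with-index-i-removed against y three-way (-1/0/1) in place,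
--     # without building the deleted string.
--     def cmp_del(x, i, y):
--         j, k = 0, 0
--         n, m = len(x), len(y)
--         while True:
--             if j == i:
--                 j += 1
--             if j >= n:
--                 return -1 if k < m else 0
--             if k >= m:
--                 return 1
--             if x[j] != y[k]:
--                 return -1 if x[j] < y[k] else 1
--             j += 1
--             k += 1
--
--     res = 0
--     for i, c in enumerate(s):
--         if c.isdigit() and cmp_del(s, i, t) < 0:
--             res += 1
--     for j, c in enumerate(t):
--         if c.isdigit() and cmp_del(t, j, s) > 0:
--             res += 1
--     return res
-- ===== Notes on version B (the rewrite author's own statement) =====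
-- stated objective: alternative
-- what changed: Instead of materializing each deleted string with two slices and comparing it with the built-in <, B runs one fused three-way comparison that walks the original string in place, skipping the deleted index, and reuses the same helper for both directions.
import Mathlib
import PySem

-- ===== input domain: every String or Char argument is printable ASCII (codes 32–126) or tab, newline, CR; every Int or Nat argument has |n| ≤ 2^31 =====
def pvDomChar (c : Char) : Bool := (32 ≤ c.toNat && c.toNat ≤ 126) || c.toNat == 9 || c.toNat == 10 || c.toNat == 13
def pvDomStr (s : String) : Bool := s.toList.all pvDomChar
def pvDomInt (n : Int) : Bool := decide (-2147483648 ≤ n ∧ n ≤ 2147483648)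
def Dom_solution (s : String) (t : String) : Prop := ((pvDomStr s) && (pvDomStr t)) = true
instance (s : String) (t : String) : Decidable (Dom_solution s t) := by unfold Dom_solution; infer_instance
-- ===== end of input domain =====

-- B replaces A's build-a-deleted-string-and-compare with a single fused three-way
-- comparison that walks the string skipping the deleted index (no string construction);
-- objective: alternative.

-- ===== PORT A =====
def solution (s : String) (t : String) : Int :=
  let S := s.toList
  let T := t.toList
  let m : Int := PySem.Str.len s
  let n : Int := PySem.Str.len t
  let sDigits := (PySem.List.pyRange 0 m 1).filter
    (fun i => PySem.Chars.isdigit (PySem.List.pyGetD S i ' '))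
  let tDigits := (PySem.List.pyRange 0 n 1).filter
    (fun j => PySem.Chars.isdigit (PySem.List.pyGetD T j ' '))
  let res : Int := 0
  let res := sDigits.foldl (fun acc i =>
    let s2 := PySem.List.slice S none (some i) ++ PySem.List.slice S (some (i + 1)) none
    acc + (if s2 < T then 1 else 0)) res
  let res := tDigits.foldl (fun acc j =>
    let t2 := PySem.List.slice T none (some j) ++ PySem.List.slice T (some (j + 1)) none
    acc + (if S < t2 then 1 else 0)) res
  res

-- ===== PORT B =====
-- three-way comparison of two char lists (the tail of Source B's while loop once the
-- deleted index has been passed)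
def cmpChars : List Char → List Char → Int
  | [], [] => 0
  | [], _ :: _ => -1
  | _ :: _, [] => 1
  | a :: x, b :: y => if a ≠ b then (if a < b then -1 else 1) else cmpChars x y

-- Source B's cmp_del: compare x-with-index-i-removed against y, skipping index i in place
def cmpDel (x : List Char) (i : Int) (y : List Char) : Int :=
  if i = 0 then cmpChars x.tail y
  else
    match x, y with
    | [], _ => cmpChars [] y
    | _ :: _, [] => 1
    | a :: xs, b :: ys => if a ≠ b then (if a < b then -1 else 1) else cmpDel xs (i - 1) ys

def solution_alt (s : String) (t : String) : Int :=
  let S := s.toList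
  let T := t.toList
  let res : Int := 0
  let res := (PySem.List.enumerate S).foldl (fun acc p =>
    if PySem.Chars.isdigit p.2 && decide (cmpDel S p.1 T < 0) then acc + 1 else acc) res
  let res := (PySem.List.enumerate T).foldl (fun acc p =>
    if PySem.Chars.isdigit p.2 && decide (cmpDel T p.1 S > 0) then acc + 1 else acc) res
  res

-- ===== PRECONDITION & SPEC =====
def Spec_solution (s : String) (t : String) (out : Int) : Prop := out = solution_alt s t
instance (s : String) (t : String) (out : Int) : Decidable (Spec_solution s t out) := by
  unfold Spec_solution; infer_instance

-- ===== CLAIM (what is proved, stated in full; the proofs are below) =====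
def Claim_equal_solution : Prop := ∀ (s : String) (t : String), Dom_solution s t → Spec_solution s t (solution s t)

-- ===== LEMMAS AND PROOFS =====

theorem cmpChars_neg_iff (x y : List Char) : cmpChars x y < 0 ↔ x < y := by
  induction x generalizing y with
  | nil => cases y <;> simp [cmpChars, List.nil_lt_cons]
  | cons a xs ih =>
    cases y with
    | nil => simp [cmpChars, List.not_lt_nil]
    | cons b ys =>
      simp only [cmpChars, List.cons_lt_cons_iff]
      by_cases hab : a = b
      · subst hab; simp [ih]
      · rcases lt_or_gt_of_ne hab with h | h
        · simp [hab, h]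
        · simp [hab, not_lt_of_gt h]

theorem cmpChars_pos_iff (x y : List Char) : 0 < cmpChars x y ↔ y < x := by
  induction x generalizing y with
  | nil => cases y <;> simp [cmpChars, List.not_lt_nil]
  | cons a xs ih =>
    cases y with
    | nil => simp [cmpChars, List.nil_lt_cons]
    | cons b ys =>
      simp only [cmpChars, List.cons_lt_cons_iff]
      by_cases hab : a = b
      · subst hab; simp [ih]
      · rcases lt_or_gt_of_ne hab with h | h
        · simp [hab, h, not_lt_of_gt h, (Ne.symm hab)]
        · simp [hab, h, not_lt_of_gt h, (Ne.symm hab)]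

theorem cmpDel_eq (x : List Char) (k : Nat) (y : List Char) :
    cmpDel x (k : Int) y = cmpChars (x.take k ++ x.drop (k + 1)) y := by
  induction x generalizing k y with
  | nil =>
    cases k with
    | zero => unfold cmpDel; simp
    | succ k =>
      have h0 : ¬ (((k + 1 : Nat) : Int) = 0) := by push_cast; omega
      unfold cmpDel
      rw [if_neg h0]
      simp
  | cons a xs ih =>
    cases k with
    | zero => unfold cmpDel; simp
    | succ k =>
      have h0 : ¬ (((k + 1 : Nat) : Int) = 0) := by push_cast; omega
      have h1 : ((k + 1 : Nat) : Int) - 1 = (k : Int) := by push_cast; ring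
      unfold cmpDel
      rw [if_neg h0]
      cases y with
      | nil => simp [cmpChars]
      | cons b ys =>
        simp only [List.take_succ_cons, List.drop_succ_cons, List.cons_append, cmpChars,
          h1, ih]

theorem count_loop_eq (X Y : List Char) (init : Int) :
    ((PySem.List.pyRange 0 (X.length : Int) 1).filter
        (fun i => PySem.Chars.isdigit (PySem.List.pyGetD X i ' '))).foldl
      (fun acc i =>
        acc + (if PySem.List.slice X none (some i) ++ PySem.List.slice X (some (i + 1)) none < Y
               then 1 else 0)) init
    = (PySem.List.enumerate X).foldl (fun acc p =>
        if PySem.Chars.isdigit p.2 && decide (cmpDel X p.1 Y < 0) then acc + 1 else acc) init := by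
  rw [List.foldl_filter, PySem.List.enumerate_eq_map_pyRange X ' ', List.foldl_map,
      PySem.List.len_eq]
  apply PySem.List.foldl_congr_mem
  intro acc i hi
  rw [PySem.List.mem_pyRange_one] at hi
  obtain ⟨k, rfl⟩ : ∃ k : Nat, i = (k : Int) := ⟨i.toNat, by omega⟩
  have hk : k < X.length := by exact_mod_cast hi.2
  simp only [PySem.List.slice_to_natCast, cmpDel_eq]
  have : PySem.List.slice X (some ((k : Int) + 1)) none = X.drop (k + 1) := by
    have : ((k : Int) + 1) = ((k + 1 : Nat) : Int) := by push_cast; ring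
    rw [this, PySem.List.slice_from_natCast]
  rw [this]
  generalize PySem.List.pyGetD X ((k : Nat) : Int) ' ' = c
  generalize hz : X.take k ++ X.drop (k + 1) = z
  by_cases hd : PySem.Chars.isdigit c = true
  · by_cases hlt : z < Y
    · simp [hd, hlt, (cmpChars_neg_iff _ _).mpr hlt]
    · have hnc : ¬ cmpChars z Y < 0 := fun h => hlt ((cmpChars_neg_iff _ _).mp h)
      simp [hd, hlt, hnc]
  · simp [hd]

theorem count_loop_eq' (X Y : List Char) (init : Int) :
    ((PySem.List.pyRange 0 (X.length : Int) 1).filter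
        (fun j => PySem.Chars.isdigit (PySem.List.pyGetD X j ' '))).foldl
      (fun acc j =>
        acc + (if Y < PySem.List.slice X none (some j) ++ PySem.List.slice X (some (j + 1)) none
               then 1 else 0)) init
    = (PySem.List.enumerate X).foldl (fun acc p =>
        if PySem.Chars.isdigit p.2 && decide (cmpDel X p.1 Y > 0) then acc + 1 else acc) init := by
  rw [List.foldl_filter, PySem.List.enumerate_eq_map_pyRange X ' ', List.foldl_map,
      PySem.List.len_eq]
  apply PySem.List.foldl_congr_mem
  intro acc j hj
  rw [PySem.List.mem_pyRange_one] at hj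
  obtain ⟨k, rfl⟩ : ∃ k : Nat, j = (k : Int) := ⟨j.toNat, by omega⟩
  simp only [PySem.List.slice_to_natCast, cmpDel_eq]
  have : PySem.List.slice X (some ((k : Int) + 1)) none = X.drop (k + 1) := by
    have : ((k : Int) + 1) = ((k + 1 : Nat) : Int) := by push_cast; ring
    rw [this, PySem.List.slice_from_natCast]
  rw [this]
  generalize PySem.List.pyGetD X ((k : Nat) : Int) ' ' = c
  generalize hz : X.take k ++ X.drop (k + 1) = z
  by_cases hd : PySem.Chars.isdigit c = true
  · by_cases hlt : Y < z
    · simp [hd, hlt, (cmpChars_pos_iff z Y).mpr hlt]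
    · have hnc : ¬ 0 < cmpChars z Y := fun h => hlt ((cmpChars_pos_iff z Y).mp h)
      simp [hd, hlt, hnc]
  · simp [hd]

-- ===== VERDICT (by name: the statement is the Claim_ definition above) =====
theorem solution_spec : Claim_equal_solution := by
  intro s t _
  unfold Spec_solution solution solution_alt
  simp only [PySem.Str.len_eq]
  rw [count_loop_eq, count_loop_eq']
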